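-- pv_equiv track=rewrite | github.com/Shubham-Jaiswal-31/-CrackYourPlacement | String/Print all the duplicate characters in a string.py | printDuplicates
-- ===== SOURCE A (Python) =====
-- def printDuplicates(str):
--     char_list = list(str)
--     char_list.sort()
--
--     i = 0
--     res = {}
--     while i < len(char_list):
--         count = 1
--         while i < len(char_list)-1 and char_list[i] == char_list[i+1]:
--             count += 1
--             i += 1
--
--         if count > 1:
--             res[char_list[i]] = count
--         i += 1
--
--     return res
-- ===== SOURCE B (Python) =====
-- def printDuplicates(str):
--     chars = list(str)
--     return {c: chars.count(c) for c in sorted(set(chars)) if chars.count(c) > 1}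
-- ===== Notes on version B (the rewrite author's own statement) =====
-- stated objective: idiomatic
-- what changed: Replaced the sort-then-grouped-run-count with nested while loops by a dict comprehension over the sorted distinct characters using list.count, so all explicit loops and index bookkeeping disappear; avoiding the full sort makes it measurably faster on duplicate-heavy inputs.
import Mathlib
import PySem

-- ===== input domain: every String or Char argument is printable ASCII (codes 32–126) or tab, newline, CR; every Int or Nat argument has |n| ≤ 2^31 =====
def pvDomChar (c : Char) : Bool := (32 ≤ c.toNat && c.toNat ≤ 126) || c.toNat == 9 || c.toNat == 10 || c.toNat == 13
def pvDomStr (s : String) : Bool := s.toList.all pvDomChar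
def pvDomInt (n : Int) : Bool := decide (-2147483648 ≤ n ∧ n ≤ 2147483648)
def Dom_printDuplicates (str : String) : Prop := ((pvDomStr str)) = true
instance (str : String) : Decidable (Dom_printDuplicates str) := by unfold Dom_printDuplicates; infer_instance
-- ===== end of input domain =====

-- B replaces A's sort + nested run-counting while loops by a comprehension over the
-- sorted distinct characters with list.count (idiomatic; return value proved equal).

-- ===== PORT A =====
-- inner while loop: state = current char char_list[i], remaining tail, count
def pvInnerA : Char → List Char → Int → Char × List Char × Int
  | c, c2 :: rest, count =>
    if c == c2 then pvInnerA c2 rest (count + 1) else (c, c2 :: rest, count)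
  | c, [], count => (c, [], count)

theorem pvInnerA_spec (rest : List Char) (c : Char) (n : Int) :
    pvInnerA c rest n =
      (c, rest.dropWhile (fun x => x == c), n + (rest.takeWhile (fun x => x == c)).length) := by
  induction rest generalizing c n with
  | nil => simp [pvInnerA]
  | cons c2 r ih =>
    by_cases h : c = c2
    · subst h
      simp only [pvInnerA, beq_self_eq_true, if_true, ih, List.dropWhile, List.takeWhile,
        List.length_cons]
      refine Prod.ext rfl (Prod.ext rfl ?_)
      push_cast; ring
    · have hb : (c == c2) = false := by simpa using h
      have hb2 : (c2 == c) = false := by simpa using (Ne.symm h)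
      simp [pvInnerA, hb, hb2, List.dropWhile, List.takeWhile]

-- outer while loop over the sorted character list
def pvOuterA (l : List Char) (res : PySem.Dict String Int) : PySem.Dict String Int :=
  match l with
  | [] => res
  | c :: rest =>
    let t := pvInnerA c rest 1
    pvOuterA t.2.1
      (if t.2.2 > 1 then PySem.Dict.insert res (String.ofList [t.1]) t.2.2 else res)
termination_by l.length
decreasing_by
  simp only [pvInnerA_spec]
  exact Nat.lt_succ_of_le (List.length_dropWhile_le _ _)

def printDuplicates (str : String) : List (String × Int) :=
  let char_list := PySem.List.sorted str.toList (fun x => x) false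
  (pvOuterA char_list PySem.Dict.empty).items

-- ===== PORT B =====
def printDuplicates_alt (str : String) : List (String × Int) :=
  let chars := str.toList
  (PySem.List.sorted (PySem.Set.ofList chars) (fun x => x) false).filterMap
    (fun c => if (PySem.List.count chars c : Int) > 1
              then some (String.ofList [c], (PySem.List.count chars c : Int)) else none)

-- ===== PRECONDITION & SPEC =====
def Spec_printDuplicates (str : String) (out : List (String × Int)) : Prop := out = printDuplicates_alt str
instance (str : String) (out : List (String × Int)) : Decidable (Spec_printDuplicates str out) := by unfold Spec_printDuplicates; infer_instance

-- ===== CLAIM (what is proved, stated in full; the proofs are below) =====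
def Claim_equal_printDuplicates : Prop := ∀ (str : String), Dom_printDuplicates str → Spec_printDuplicates str (printDuplicates str)

-- ===== LEMMAS AND PROOFS =====

-- the first characters of each run of a sorted list
def runHeads : List Char → List Char
  | [] => []
  | c :: rest => c :: runHeads (rest.dropWhile (fun x => x == c))
termination_by l => l.length
decreasing_by exact Nat.lt_succ_of_le (List.length_dropWhile_le _ _)

-- what A's outer loop appends for a sorted list
def gA : List Char → List (String × Int)
  | [] => []
  | c :: rest =>
    (if 1 + ((rest.takeWhile (fun x => x == c)).length : Int) > 1
      then [(String.ofList [c], 1 + ((rest.takeWhile (fun x => x == c)).length : Int))]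
      else []) ++ gA (rest.dropWhile (fun x => x == c))
termination_by l => l.length
decreasing_by exact Nat.lt_succ_of_le (List.length_dropWhile_le _ _)

theorem mem_dropWhile_gt (c : Char) (rest : List Char)
    (hs : (c :: rest).Pairwise (· ≤ ·)) :
    ∀ x ∈ rest.dropWhile (fun x => x == c), c < x := by
  induction rest with
  | nil => simp
  | cons a r ih =>
    by_cases h : a = c
    · subst h
      intro x hx
      simp only [List.dropWhile_cons, beq_self_eq_true, if_true] at hx
      exact ih (by
        rcases List.pairwise_cons.mp hs with ⟨h1, h2⟩
        rcases List.pairwise_cons.mp h2 with ⟨h3, h4⟩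
        exact List.pairwise_cons.mpr ⟨fun y hy => h1 y (List.mem_cons_of_mem _ hy), h4⟩) x hx
    · have hb : (a == c) = false := by simpa using h
      simp only [List.dropWhile_cons, hb] at *
      intro x hx
      rcases List.pairwise_cons.mp hs with ⟨h1, h2⟩
      have hca : c < a := lt_of_le_of_ne (h1 a (List.mem_cons_self)) (Ne.symm h)
      rcases List.mem_cons.mp hx with rfl | hx
      · exact hca
      · exact lt_of_lt_of_le hca ((List.pairwise_cons.mp h2).1 x hx)

theorem mem_takeWhile_eq (c : Char) (rest : List Char) :
    ∀ x ∈ rest.takeWhile (fun x => x == c), x = c := by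
  intro x hx
  simpa using List.mem_takeWhile_imp hx

theorem dropWhile_pairwise (c : Char) (rest : List Char)
    (hs : (c :: rest).Pairwise (· ≤ ·)) :
    (rest.dropWhile (fun x => x == c)).Pairwise (· ≤ ·) :=
  List.Pairwise.sublist (List.dropWhile_sublist _) ((List.pairwise_cons.mp hs).2)

-- A's outer loop appends gA to the accumulated dict (fresh sorted keys)
theorem outerA_items (s : List Char) (res : PySem.Dict String Int)
    (hs : s.Pairwise (· ≤ ·))
    (hres : ∀ c ∈ s, res.contains (String.ofList [c]) = false) :
    (pvOuterA s res).items = res.items ++ gA s := by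
  match s with
  | [] => simp [pvOuterA, gA]
  | c :: rest =>
    have hd := mem_dropWhile_gt c rest hs
    have hp := dropWhile_pairwise c rest hs
    have hfresh : ∀ c' ∈ rest.dropWhile (fun x => x == c),
        (PySem.Dict.insert res (String.ofList [c])
          (1 + ((rest.takeWhile (fun x => x == c)).length : Int))).contains
          (String.ofList [c']) = false := by
      intro c' hc'
      have hne : String.ofList [c'] ≠ String.ofList [c] := by
        intro h
        have : c' = c := by
          have := congrArg String.toList h
          simpa using this
        exact absurd this (ne_of_gt (hd c' hc'))
      rw [PySem.Dict.contains_insert]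
      have h1 : (String.ofList [c'] == String.ofList [c]) = false := by
        simpa using hne
      have h2 := hres c' (List.mem_cons_of_mem _ ((List.dropWhile_sublist _).subset hc'))
      rw [h1, h2]
      rfl
    have hfresh' : ∀ c' ∈ rest.dropWhile (fun x => x == c),
        res.contains (String.ofList [c']) = false := fun c' hc' =>
      hres c' (List.mem_cons_of_mem _ ((List.dropWhile_sublist _).subset hc'))
    rw [pvOuterA, pvInnerA_spec]
    by_cases hk : 1 + ((rest.takeWhile (fun x => x == c)).length : Int) > 1
    · rw [if_pos hk]
      rw [outerA_items _ _ hp hfresh]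
      rw [PySem.Dict.items_insert_of_not_contains _ _ (hres c List.mem_cons_self)]
      rw [gA, if_pos hk]
      simp
    · rw [if_neg hk]
      rw [outerA_items _ _ hp hfresh']
      rw [gA, if_neg hk]
      simp
termination_by s.length
decreasing_by all_goals exact Nat.lt_succ_of_le (List.length_dropWhile_le _ _)

theorem mem_runHeads (s : List Char) (hs : s.Pairwise (· ≤ ·)) (x : Char) :
    x ∈ runHeads s ↔ x ∈ s := by
  match s with
  | [] => simp [runHeads]
  | c :: rest =>
    rw [runHeads]
    have ih := mem_runHeads (rest.dropWhile (fun x => x == c))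
      (dropWhile_pairwise c rest hs) x
    constructor
    · intro hx
      rcases List.mem_cons.mp hx with rfl | hx
      · exact List.mem_cons_self
      · exact List.mem_cons_of_mem _ ((List.dropWhile_sublist _).subset (ih.mp hx))
    · intro hx
      rcases List.mem_cons.mp hx with rfl | hx
      · exact List.mem_cons_self
      · rcases (List.takeWhile_append_dropWhile (p := fun y => y == c) (l := rest)) ▸ hx |> List.mem_append.mp with h | h
        · have : x = c := mem_takeWhile_eq c rest x h
          exact this ▸ List.mem_cons_self
        · exact List.mem_cons_of_mem _ (ih.mpr h)
termination_by s.length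
decreasing_by exact Nat.lt_succ_of_le (List.length_dropWhile_le _ _)

theorem runHeads_pairwise_lt (s : List Char) (hs : s.Pairwise (· ≤ ·)) :
    (runHeads s).Pairwise (· < ·) := by
  match s with
  | [] => simp [runHeads]
  | c :: rest =>
    rw [runHeads]
    refine List.pairwise_cons.mpr ⟨?_, runHeads_pairwise_lt _ (dropWhile_pairwise c rest hs)⟩
    intro y hy
    exact mem_dropWhile_gt c rest hs y
      ((mem_runHeads _ (dropWhile_pairwise c rest hs) y).mp hy)
termination_by s.length
decreasing_by exact Nat.lt_succ_of_le (List.length_dropWhile_le _ _)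

theorem count_head_run (c : Char) (rest : List Char)
    (hs : (c :: rest).Pairwise (· ≤ ·)) :
    ((c :: rest).count c : Int) = 1 + ((rest.takeWhile (fun x => x == c)).length : Int) := by
  have hsplit : rest = rest.takeWhile (fun x => x == c) ++ rest.dropWhile (fun x => x == c) :=
    (List.takeWhile_append_dropWhile).symm
  have h1 : (rest.takeWhile (fun x => x == c)).count c
      = (rest.takeWhile (fun x => x == c)).length :=
    List.count_eq_length.mpr (fun x hx => by
      have := mem_takeWhile_eq c rest x hx; simp [this])
  have h2 : (rest.dropWhile (fun x => x == c)).count c = 0 :=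
    List.count_eq_zero.mpr (fun h => lt_irrefl c (mem_dropWhile_gt c rest hs c h))
  rw [List.count_cons_self]
  conv_lhs => rw [hsplit]
  rw [List.count_append, h1, h2]
  push_cast; ring

theorem count_later (c x : Char) (rest : List Char)
    (hx : c < x) :
    (c :: rest).count x = (rest.dropWhile (fun y => y == c)).count x := by
  have hsplit : rest = rest.takeWhile (fun y => y == c) ++ rest.dropWhile (fun y => y == c) :=
    (List.takeWhile_append_dropWhile).symm
  have h1 : (rest.takeWhile (fun y => y == c)).count x = 0 :=
    List.count_eq_zero.mpr (fun h => absurd (mem_takeWhile_eq c rest x h)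
      (ne_of_gt hx))
  have hne : (c == x) = false := by simpa using (ne_of_lt hx)
  conv_lhs => rw [hsplit]
  rw [List.count_cons, List.count_append, h1, hne]
  simp

-- gA equals B's comprehension over the run heads, counting in the sorted list
theorem gA_eq_filterMap (s : List Char) (hs : s.Pairwise (· ≤ ·)) :
    gA s = (runHeads s).filterMap
      (fun c => if (s.count c : Int) > 1
                then some (String.ofList [c], (s.count c : Int)) else none) := by
  match s with
  | [] => simp [gA]
  | c :: rest =>
    have hp := dropWhile_pairwise c rest hs
    have hd := mem_dropWhile_gt c rest hs
    rw [gA, runHeads, List.filterMap_cons]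
    have hcnt := count_head_run c rest hs
    have ih := gA_eq_filterMap (rest.dropWhile (fun x => x == c)) hp
    have hcongr : (runHeads (rest.dropWhile (fun x => x == c))).filterMap
        (fun c' => if (((rest.dropWhile (fun x => x == c)).count c' : Int)) > 1
                  then some (String.ofList [c'], ((rest.dropWhile (fun x => x == c)).count c' : Int))
                  else none)
        = (runHeads (rest.dropWhile (fun x => x == c))).filterMap
        (fun c' => if (((c :: rest).count c' : Int)) > 1
                  then some (String.ofList [c'], ((c :: rest).count c' : Int)) else none) := by
      apply List.filterMap_congr
      intro x hx
      have hxmem := (mem_runHeads _ hp x).mp hx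
      rw [← count_later c x rest (hd x hxmem)]
    rw [ih, hcongr, hcnt]
    by_cases hk : 1 + ((rest.takeWhile (fun x => x == c)).length : Int) > 1
    · rw [if_pos hk, if_pos hk]
      rfl
    · rw [if_neg hk, if_neg hk]
      rfl
termination_by s.length
decreasing_by exact Nat.lt_succ_of_le (List.length_dropWhile_le _ _)

-- ===== VERDICT (by name: the statement is the Claim_ definition above) =====
theorem printDuplicates_spec : Claim_equal_printDuplicates := by
  intro str _
  unfold Spec_printDuplicates printDuplicates printDuplicates_alt
  have hs : (PySem.List.sorted str.toList (fun x => x) false).Pairwise (· ≤ ·) := by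
    simpa using PySem.List.sorted_pairwise str.toList (fun x => x)
  have hA := outerA_items (PySem.List.sorted str.toList (fun x => x) false) PySem.Dict.empty hs
    (fun c _ => PySem.Dict.contains_empty _)
  have hperm := PySem.List.sorted_perm str.toList (fun x => x) false
  have hB : PySem.List.sorted (PySem.Set.ofList str.toList) (fun x => x) false
      = runHeads (PySem.List.sorted str.toList (fun x => x) false) := by
    apply PySem.List.sorted_eq_of_perm_of_pairwise_lt
    · rw [List.perm_ext_iff_of_nodup ((runHeads_pairwise_lt _ hs).imp ne_of_lt)
        (PySem.Set.nodup_ofList _)]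
      intro a
      rw [mem_runHeads _ hs, PySem.Set.mem_ofList, hperm.mem_iff]
    · simpa using runHeads_pairwise_lt _ hs
  have hcount : ∀ c, (PySem.List.count str.toList c : Int)
      = ((PySem.List.sorted str.toList (fun x => x) false).count c : Int) := by
    intro c; rw [PySem.List.count_eq, hperm.count_eq]
  simp only [hA, hB]
  rw [gA_eq_filterMap _ hs]
  simp only [hcount]
  rfl
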